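-- pv_equiv track=rewrite | github.com/jorge90c/19.WebscrapingCoches | alerta.py | normalize_message_lines
-- ===== SOURCE A (Python) =====
-- def normalize_message_lines(lines: list[str], max_chars: int) -> list[str]:
--     normalized: list[str] = []
--     for line in lines:
--         cleaned = line.strip()
--         if not cleaned:
--             if normalized and normalized[-1] != "":
--                 normalized.append("")
--             continue
--
--         normalized.append(cleaned[:max_chars])
--
--     if normalized and normalized[-1] == "":
--         normalized.pop()
--
--     return normalized
-- ===== SOURCE B (Python) =====
-- def normalize_message_lines(lines: list[str], max_chars: int) -> list[str]:
--     cleaned = [line.strip() for line in lines]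
--     out: list[str] = []
--     n = len(cleaned)
--     i = 0
--     while i < n:
--         if cleaned[i]:
--             # non-blank run: emit every truncated value
--             while i < n and cleaned[i]:
--                 out.append(cleaned[i][:max_chars])
--                 i += 1
--         else:
--             # blank run: at most one separator, only after a non-empty value
--             while i < n and not cleaned[i]:
--                 i += 1
--             if out and out[-1] != "":
--                 out.append("")
--     if out and out[-1] == "":
--         out.pop()
--     return out
-- ===== Notes on version B (the rewrite author's own statement) =====
-- stated objective: alternative
-- what changed: Replaces A's per-line state machine (append / maybe-append-separator depending on the last emitted element at each line) by a two-level run scan: strip all lines once, then walk maximal runs of consecutive non-blank lines (emitting every truncated value of the run at once) and blank runs (collapsed to at most one separator), with the same trailing-empty pop.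
import Mathlib
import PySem

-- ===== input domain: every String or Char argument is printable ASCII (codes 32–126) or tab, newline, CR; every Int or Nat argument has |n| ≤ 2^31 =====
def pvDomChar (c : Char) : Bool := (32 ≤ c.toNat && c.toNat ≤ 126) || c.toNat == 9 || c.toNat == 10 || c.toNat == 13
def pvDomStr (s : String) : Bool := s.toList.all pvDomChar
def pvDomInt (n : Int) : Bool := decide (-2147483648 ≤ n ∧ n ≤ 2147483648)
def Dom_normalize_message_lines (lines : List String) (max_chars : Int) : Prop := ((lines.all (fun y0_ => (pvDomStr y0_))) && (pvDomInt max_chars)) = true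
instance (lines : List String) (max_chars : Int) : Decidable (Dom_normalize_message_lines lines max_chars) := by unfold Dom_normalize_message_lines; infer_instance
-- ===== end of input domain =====

-- B re-implements A's per-line state machine as a scan over maximal runs of blank / non-blank stripped lines; same output, same cost (objective: alternative).

-- ===== PORT A =====
def normalize_message_lines (lines : List String) (max_chars : Int) : List String :=
  let normalized := lines.foldl (fun acc line =>
    let cleaned := PySem.Str.strip line
    if cleaned = "" then
      if acc ≠ [] ∧ acc.getLast? ≠ some "" then acc ++ [""] else acc
    else
      acc ++ [PySem.Str.slice cleaned none (some max_chars)]) []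
  if normalized ≠ [] ∧ normalized.getLast? = some "" then normalized.dropLast else normalized

-- ===== PORT B =====
-- the while-loop of Source B: consume one maximal run (non-blank or blank) per step
def pvAltLoop (mc : Int) (out : List String) (cs : List String) : List String :=
  match cs with
  | [] => out
  | c :: rest =>
    if c ≠ "" then
      pvAltLoop mc
        (out ++ (c :: rest.takeWhile (fun s => !(s == ""))).map (fun s => PySem.Str.slice s none (some mc)))
        (rest.dropWhile (fun s => !(s == "")))
    else
      pvAltLoop mc
        (if out ≠ [] ∧ out.getLast? ≠ some "" then out ++ [""] else out)
        (rest.dropWhile (fun s => s == ""))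
  termination_by cs.length
  decreasing_by
  · exact Nat.lt_succ_of_le (List.length_dropWhile_le _ _)
  · exact Nat.lt_succ_of_le (List.length_dropWhile_le _ _)

def normalize_message_lines_alt (lines : List String) (max_chars : Int) : List String :=
  let out := pvAltLoop max_chars [] (lines.map PySem.Str.strip)
  if out ≠ [] ∧ out.getLast? = some "" then out.dropLast else out

-- ===== PRECONDITION & SPEC =====
def Spec_normalize_message_lines (lines : List String) (max_chars : Int) (out : List String) : Prop := out = normalize_message_lines_alt lines max_chars
instance (lines : List String) (max_chars : Int) (out : List String) : Decidable (Spec_normalize_message_lines lines max_chars out) := by unfold Spec_normalize_message_lines; infer_instance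

-- ===== CLAIM (what is proved, stated in full; the proofs are below) =====
def Claim_equal_normalize_message_lines : Prop := ∀ (lines : List String) (max_chars : Int), Dom_normalize_message_lines lines max_chars → Spec_normalize_message_lines lines max_chars (normalize_message_lines lines max_chars)

-- ===== LEMMAS AND PROOFS =====

-- A's per-line step, on an already-stripped line
def pvStep (mc : Int) (acc : List String) (c : String) : List String :=
  if c = "" then
    if acc ≠ [] ∧ acc.getLast? ≠ some "" then acc ++ [""] else acc
  else
    acc ++ [PySem.Str.slice c none (some mc)]

theorem pvFold_nonblank (mc : Int) (cs : List String) (acc : List String)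
    (h : ∀ c ∈ cs, c ≠ "") :
    cs.foldl (pvStep mc) acc = acc ++ cs.map (fun s => PySem.Str.slice s none (some mc)) := by
  induction cs generalizing acc with
  | nil => simp
  | cons c rest ih =>
    have hc : c ≠ "" := h c (by simp)
    simp only [List.foldl_cons, List.map_cons, pvStep, if_neg hc]
    rw [ih _ (fun x hx => h x (by simp [hx]))]
    simp

theorem pvFold_blank (mc : Int) (cs : List String) (acc : List String)
    (hall : ∀ c ∈ cs, c = "") (hacc : acc = [] ∨ acc.getLast? = some "") :
    cs.foldl (pvStep mc) acc = acc := by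
  induction cs with
  | nil => simp
  | cons c rest ih =>
    have hc : c = "" := hall c (by simp)
    have hcond : ¬ (acc ≠ [] ∧ acc.getLast? ≠ some "") := by
      rcases hacc with h | h <;> simp [h]
    simp only [List.foldl_cons, pvStep, if_pos hc, if_neg hcond]
    exact ih (fun x hx => hall x (by simp [hx]))

theorem pvFold_eq_altLoop (mc : Int) (cs : List String) (acc : List String) :
    cs.foldl (pvStep mc) acc = pvAltLoop mc acc cs := by
  induction hn : cs.length using Nat.strong_induction_on generalizing cs acc with
  | _ n ih =>
  match cs with
  | [] => simp [pvAltLoop]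
  | c :: rest =>
    by_cases hc : c = ""
    · -- blank run
      have hsplit := List.takeWhile_append_dropWhile (p := fun s => s == "") (l := rest)
      set acc' := if acc ≠ [] ∧ acc.getLast? ≠ some "" then acc ++ [""] else acc with hacc'
      have hinv : acc' = [] ∨ acc'.getLast? = some "" := by
        rw [hacc']; split_ifs with h
        · right; simp
        · by_cases he : acc = []
          · left; exact he
          · right
            rcases not_and_or.mp h with h1 | h1
            · exact absurd he (by simpa using h1)
            · simpa using h1
      have step1 : (c :: rest).foldl (pvStep mc) acc = rest.foldl (pvStep mc) acc' := by
        simp only [List.foldl_cons, pvStep, if_pos hc, hacc']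
      have hL : rest.foldl (pvStep mc) acc'
          = (rest.dropWhile (fun s => s == "")).foldl (pvStep mc) acc' := by
        conv_lhs => rw [← hsplit]
        rw [List.foldl_append, pvFold_blank mc (rest.takeWhile (fun s => s == "")) acc' (fun x hx => by
          have := List.mem_takeWhile_imp hx
          simpa using this) hinv]
      rw [step1, hL,
        ih ((rest.dropWhile (fun s => s == "")).length)
          (by subst hn; exact Nat.lt_succ_of_le (List.length_dropWhile_le _ _)) _ _ rfl]
      rw [pvAltLoop, if_neg (by simp [hc])]
    · -- non-blank run
      have hsplit := List.takeWhile_append_dropWhile (p := fun s => !(s == "")) (l := rest)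
      have step1 : (c :: rest).foldl (pvStep mc) acc
          = rest.foldl (pvStep mc) (acc ++ [PySem.Str.slice c none (some mc)]) := by
        simp only [List.foldl_cons, pvStep, if_neg hc]
      have hL : rest.foldl (pvStep mc) (acc ++ [PySem.Str.slice c none (some mc)])
          = (rest.dropWhile (fun s => !(s == ""))).foldl (pvStep mc)
              ((acc ++ [PySem.Str.slice c none (some mc)]) ++
                (rest.takeWhile (fun s => !(s == ""))).map
                  (fun s => PySem.Str.slice s none (some mc))) := by
        conv_lhs => rw [← hsplit]
        rw [List.foldl_append, pvFold_nonblank mc (rest.takeWhile (fun s => !(s == "")))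
          (acc ++ [PySem.Str.slice c none (some mc)]) (fun x hx => by
          have := List.mem_takeWhile_imp hx
          simpa using this)]
      rw [step1, hL,
        ih ((rest.dropWhile (fun s => !(s == ""))).length)
          (by subst hn; exact Nat.lt_succ_of_le (List.length_dropWhile_le _ _)) _ _ rfl]
      rw [pvAltLoop, if_pos hc]
      congr 1
      simp

-- ===== VERDICT (by name: the statement is the Claim_ definition above) =====
theorem normalize_message_lines_spec : Claim_equal_normalize_message_lines := by
  intro lines max_chars _
  unfold Spec_normalize_message_lines normalize_message_lines normalize_message_lines_alt
  have hfun : (fun (acc : List String) (line : String) =>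
      let cleaned := PySem.Str.strip line
      if cleaned = "" then
        if acc ≠ [] ∧ acc.getLast? ≠ some "" then acc ++ [""] else acc
      else
        acc ++ [PySem.Str.slice cleaned none (some max_chars)])
      = fun acc line => pvStep max_chars acc (PySem.Str.strip line) := rfl
  have : lines.foldl (fun acc line => pvStep max_chars acc (PySem.Str.strip line)) []
      = pvAltLoop max_chars [] (lines.map PySem.Str.strip) := by
    rw [← List.foldl_map]
    exact pvFold_eq_altLoop max_chars _ []
  simp only [hfun, this]
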